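-- pv_equiv track=rewrite | github.com/sassoncharlotte/Cartable-Fantastique | fantastic/exercises/choose/choices_processing.py | choices_to_html
-- ===== SOURCE A (Python) =====
-- from typing import List
--
-- def choices_to_html(choices: List[List[str]]):
--     """
--     Generate html part of the choices
--
--     Parameters:
--         choices (List[List[str]]): The list containing the lists of couple of choices to
--         display in each fill char of the exercise
--         (different from the final_clean_choices)
--     Returns:
--         html_choices_list (List[str]): The list containing the html strings associated to
--         each place where to select choices
--     """
--     button_choice_html = '<td>\n<button class="word mc_button_choice color{}" \
--                         onclick="setChoiceValue(this)" id_mc_button="mc_button_{}" \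
--                         id_mc_menu="mc_menu_{}">{}</button>\n</td>\n'
--     html_choices_list = []
--     for i, couple_choices in enumerate(choices):
--         number_of_choices = len(couple_choices)
--         html_choices = f'<div class="mc_menu" id="mc_menu_{i}" \
--                         display: none; position:absolute;>\n<table>\n<tbody>\n'
--         for j in range(number_of_choices):
--             if j == 0:
--                 html_choices += "<tr>\n"
--             elif not j % 2: # to print 2 choices per line
--                 html_choices += "</tr>\n<tr>\n"
--             html_choices += button_choice_html.format(j % 3, i, i, choices[i][j])
--         html_choices += "</tr>\n</tbody>\n</table>\n</div>"
--         html_choices_list.append(html_choices)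
--     return html_choices_list
-- ===== SOURCE B (Python) =====
-- from typing import List
--
-- def choices_to_html(choices: List[List[str]]):
--     """Row-wise recursive construction: consume choices two per table row."""
--     button_choice_html = '<td>\n<button class="word mc_button_choice color{}" \
--                         onclick="setChoiceValue(this)" id_mc_button="mc_button_{}" \
--                         id_mc_menu="mc_menu_{}">{}</button>\n</td>\n'
--
--     def menu_body(i, r, items):
--         if not items:
--             return ""
--         row = items[:2]
--         cells = "".join(button_choice_html.format((2 * r + c) % 3, i, i, x)
--                         for c, x in enumerate(row))
--         opening = ("" if r == 0 else "</tr>\n") + "<tr>\n"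
--         return opening + cells + menu_body(i, r + 1, items[2:])
--
--     return ['<div class="mc_menu" id="mc_menu_{}" \
--                         display: none; position:absolute;>\n<table>\n<tbody>\n'.format(i)
--             + menu_body(i, 0, couple)
--             + "</tr>\n</tbody>\n</table>\n</div>"
--             for i, couple in enumerate(choices)]
-- ===== Notes on version B (the rewrite author's own statement) =====
-- stated objective: alternative
-- what changed: B replaces A's flat indexed loop with j==0 / j%2 / j%3 branching and string += by a recursive helper that consumes the choices two per table row (building each <tr> from a slice, cells joined from an enumerate of the row) and a list comprehension over enumerate(choices).
import Mathlib
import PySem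

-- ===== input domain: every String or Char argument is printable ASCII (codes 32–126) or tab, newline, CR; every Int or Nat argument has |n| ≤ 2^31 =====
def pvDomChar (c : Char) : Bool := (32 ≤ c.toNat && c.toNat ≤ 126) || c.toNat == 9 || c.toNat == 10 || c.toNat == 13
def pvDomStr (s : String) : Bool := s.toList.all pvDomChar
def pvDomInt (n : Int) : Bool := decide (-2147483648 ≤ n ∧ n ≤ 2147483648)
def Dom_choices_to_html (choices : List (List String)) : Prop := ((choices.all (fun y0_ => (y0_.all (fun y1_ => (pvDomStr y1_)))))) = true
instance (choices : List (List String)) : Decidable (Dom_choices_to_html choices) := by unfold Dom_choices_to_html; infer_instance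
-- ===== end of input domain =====

-- B builds each menu row-wise (recursion consuming two choices per <tr>) instead of A's flat
-- index loop with j%2 branches; objective: alternative decomposition, same cost.

-- ===== PORT A =====
-- shared literal pieces of the two Python templates ('{}'-split); .format ported as concatenation with PySem.Int.toStr
def pvBtn (col : Int) (i : Int) (txt : String) : String :=
  "<td>\n<button class=\"word mc_button_choice color" ++ PySem.Int.toStr col
  ++ "\"                         onclick=\"setChoiceValue(this)\" id_mc_button=\"mc_button_" ++ PySem.Int.toStr i
  ++ "\"                         id_mc_menu=\"mc_menu_" ++ PySem.Int.toStr i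
  ++ "\">" ++ txt ++ "</button>\n</td>\n"

def pvHeader (i : Int) : String :=
  "<div class=\"mc_menu\" id=\"mc_menu_" ++ PySem.Int.toStr i
  ++ "\"                         display: none; position:absolute;>\n<table>\n<tbody>\n"

-- A: for i, couple in enumerate(choices): inner loop over j in range(len(couple)), appending to html.
-- choices[i][j] is the enumerate value p.2 indexed at j (exact: i comes from enumerate); j ∈ range(len) so pyGetD is exact.
def choices_to_html (choices : List (List String)) : List String :=
  (PySem.List.enumerate choices).foldl
    (fun acc p =>
      acc ++ [((PySem.List.pyRange 0 (PySem.List.len p.2) 1).foldl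
          (fun h j =>
            (if j == 0 then h ++ "<tr>\n"
             else if PySem.Int.mod j 2 == 0 then h ++ "</tr>\n<tr>\n" else h)
            ++ pvBtn (PySem.Int.mod j 3) p.1 (PySem.List.pyGetD p.2 j ""))
          (pvHeader p.1))
        ++ "</tr>\n</tbody>\n</table>\n</div>"])
    []

-- ===== PORT B =====
-- recursive helper menu_body(i, r, items): one <tr> per two choices
def pvMenuBody (i : Int) (r : Int) (items : List String) : String :=
  match items with
  | [] => ""
  | x :: rest =>
    ((if r == 0 then "" else "</tr>\n") ++ "<tr>\n")
    ++ PySem.Str.join "" ((PySem.List.enumerate (PySem.List.slice (x :: rest) none (some 2))).map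
        (fun p => pvBtn (PySem.Int.mod (2 * r + p.1) 3) i p.2))
    ++ pvMenuBody i (r + 1) (PySem.List.slice (x :: rest) (some 2) none)
termination_by items.length
decreasing_by
  rw [show (PySem.List.slice (x :: rest) (some 2) none) = (x :: rest).drop 2 from
        PySem.List.slice_from _ (by norm_num)]
  simp

def choices_to_html_alt (choices : List (List String)) : List String :=
  (PySem.List.enumerate choices).map
    (fun p => pvHeader p.1 ++ pvMenuBody p.1 0 p.2 ++ "</tr>\n</tbody>\n</table>\n</div>")

-- ===== PRECONDITION & SPEC =====
def Spec_choices_to_html (choices : List (List String)) (out : List String) : Prop := out = choices_to_html_alt choices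
instance (choices : List (List String)) (out : List String) : Decidable (Spec_choices_to_html choices out) := by unfold Spec_choices_to_html; infer_instance

-- ===== CLAIM (what is proved, stated in full; the proofs are below) =====
def Claim_equal_choices_to_html : Prop := ∀ (choices : List (List String)), Dom_choices_to_html choices → Spec_choices_to_html choices (choices_to_html choices)

-- ===== LEMMAS AND PROOFS =====

lemma pv_lit : "</tr>\n<tr>\n" = "</tr>\n" ++ "<tr>\n" := by decide

lemma pvMenuBody_nil (i r : Int) : pvMenuBody i r [] = "" := by rw [pvMenuBody]

lemma pvMenuBody_cons (i r : Int) (x : String) (rest : List String) :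
    pvMenuBody i r (x :: rest) =
      ((if r == 0 then "" else "</tr>\n") ++ "<tr>\n")
      ++ PySem.Str.join "" ((PySem.List.enumerate (PySem.List.slice (x :: rest) none (some 2))).map
          (fun p => pvBtn (PySem.Int.mod (2 * r + p.1) 3) i p.2))
      ++ pvMenuBody i (r + 1) (PySem.List.slice (x :: rest) (some 2) none) := by
  rw [pvMenuBody]

lemma pv_join_two (a b : String) : PySem.Str.join "" [a, b] = a ++ b := by
  apply String.ext; simp [PySem.Str.join, PySem.Chars.join, List.intercalate]

lemma pv_join_one (a : String) : PySem.Str.join "" [a] = a := by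
  apply String.ext; simp [PySem.Str.join, PySem.Chars.join, List.intercalate]

lemma pv_slice_two {x y : String} (t : List String) :
    PySem.List.slice (x :: y :: t) none (some 2) = [x, y] := by
  rw [PySem.List.slice_to _ (by norm_num)]; rfl

lemma pv_slice_one (x : String) : PySem.List.slice [x] none (some 2) = [x] := by
  rw [PySem.List.slice_to _ (by norm_num)]; rfl

lemma pv_drop_two {x y : String} (t : List String) :
    PySem.List.slice (x :: y :: t) (some 2) none = t := by
  rw [PySem.List.slice_from _ (by norm_num)]; rfl

lemma pv_drop_one (x : String) : PySem.List.slice [x] (some 2) none = [] := by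
  rw [PySem.List.slice_from _ (by norm_num)]; rfl

lemma pvPairInd {a : Type} {P : List a -> Prop} (h0 : P []) (h1 : forall x, P [x])
    (h2 : forall x y t, P t -> P (x :: y :: t)) : forall l, P l
  | [] => h0
  | [x] => h1 x
  | x :: y :: t => h2 x y t (pvPairInd h0 h1 h2 t)

lemma pv_body_eq (i : Int) (l : List String) : ∀ (r : Int), 0 ≤ r → ∀ (h0 : String),
    (PySem.List.enumerate l (2 * r)).foldl
      (fun h p =>
        (if p.1 == 0 then h ++ "<tr>\n"
         else if PySem.Int.mod p.1 2 == 0 then h ++ "</tr>\n<tr>\n" else h)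
        ++ pvBtn (PySem.Int.mod p.1 3) i p.2) h0
    = h0 ++ pvMenuBody i r l := by
  induction l using pvPairInd with
  | h0 =>
    intro r hr h0
    rw [PySem.List.enumerate_nil, List.foldl_nil, pvMenuBody_nil, String.append_empty]
  | h1 x =>
    intro r hr h0
    rw [PySem.List.enumerate_cons, PySem.List.enumerate_nil, List.foldl_cons, List.foldl_nil,
        pvMenuBody_cons, pv_slice_one, pv_drop_one, pvMenuBody_nil]
    by_cases hr0 : r = 0
    · subst hr0
      simp [pv_join_one, String.append_assoc, String.append_empty, String.empty_append]
    · have hne : ((2 * r : Int) == 0) = false := by simp; omega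
      have hne' : ((r : Int) == 0) = false := by simp [hr0]
      simp [hne, hne', pv_join_one, pv_lit, String.append_assoc, String.append_empty]
  | h2 x y t ih =>
    intro r hr h0
    rw [PySem.List.enumerate_cons, PySem.List.enumerate_cons, List.foldl_cons, List.foldl_cons,
        show (2 * r + 1 + 1 : Int) = 2 * (r + 1) from by ring, ih (r + 1) (by omega),
        pvMenuBody_cons, pv_slice_two, pv_drop_two]
    by_cases hr0 : r = 0
    · subst hr0
      simp [pv_join_two, String.append_assoc, String.empty_append]
    · have hne : ((2 * r : Int) == 0) = false := by simp; omega
      have hne' : ((r : Int) == 0) = false := by simp [hr0]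
      have hodd : ¬(2 * r + 1 : Int) = 0 := by omega
      simp [hne, hne', hodd, pv_join_two, pv_lit, String.append_assoc]

-- ===== VERDICT (by name: the statement is the Claim_ definition above) =====
theorem choices_to_html_spec : Claim_equal_choices_to_html := by
  intro choices _
  unfold Spec_choices_to_html choices_to_html choices_to_html_alt
  rw [PySem.List.foldl_append_singleton_eq_map]
  simp only [List.nil_append]
  apply List.map_congr_left
  intro p _
  congr 1
  have h := pv_body_eq p.1 p.2 0 (by norm_num) (pvHeader p.1)
  rw [show (2 : Int) * 0 = 0 from by norm_num] at h
  rw [PySem.List.enumerate_eq_map_pyRange p.2 ""] at h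
  rw [List.foldl_map] at h
  exact h
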